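-- pv_equiv track=rewrite | github.com/playsquareoff/statmagic | scrape_scores.py | _ordered_period_keys
-- ===== SOURCE A (Python) =====
-- def _ordered_period_keys(scores_dict):
--     """Return period keys in display order (quarters followed by overtime)."""
--     base_order = [label for label in ['1st', '2nd', '3rd', '4th'] if label in scores_dict]
--     ot_keys = [key for key in scores_dict.keys() if key.startswith('OT')]
--
--     def _ot_sort_key(label: str) -> int:
--         if label == 'OT':
--             return 1
--         suffix = label[2:]
--         return int(suffix) if suffix.isdigit() else 99
--
--     ot_ordered = sorted(ot_keys, key=_ot_sort_key)
--     return base_order + ot_ordered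
-- ===== SOURCE B (Python) =====
-- def _ordered_period_keys(scores_dict):
--     """Return period keys in display order (quarters followed by overtime)."""
--     quarter_rank = {'1st': 0, '2nd': 1, '3rd': 2, '4th': 3}
--
--     def _key(label):
--         if label in quarter_rank:
--             return (0, quarter_rank[label])
--         if label == 'OT':
--             return (1, 1)
--         suffix = label[2:]
--         return (1, int(suffix) if suffix.isdigit() else 99)
--
--     wanted = [key for key in scores_dict.keys()
--               if key in quarter_rank or key.startswith('OT')]
--     return sorted(wanted, key=_key)
-- ===== Notes on version B (the rewrite author's own statement) =====
-- stated objective: simpler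
-- what changed: Replaces the two-phase construction (fixed-order quarter selection plus a separately sorted overtime list, concatenated) by one stable keyed sort over a single filtered key list, with a tuple key that places quarters (0, rank) before overtimes (1, rank).
import Mathlib
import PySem

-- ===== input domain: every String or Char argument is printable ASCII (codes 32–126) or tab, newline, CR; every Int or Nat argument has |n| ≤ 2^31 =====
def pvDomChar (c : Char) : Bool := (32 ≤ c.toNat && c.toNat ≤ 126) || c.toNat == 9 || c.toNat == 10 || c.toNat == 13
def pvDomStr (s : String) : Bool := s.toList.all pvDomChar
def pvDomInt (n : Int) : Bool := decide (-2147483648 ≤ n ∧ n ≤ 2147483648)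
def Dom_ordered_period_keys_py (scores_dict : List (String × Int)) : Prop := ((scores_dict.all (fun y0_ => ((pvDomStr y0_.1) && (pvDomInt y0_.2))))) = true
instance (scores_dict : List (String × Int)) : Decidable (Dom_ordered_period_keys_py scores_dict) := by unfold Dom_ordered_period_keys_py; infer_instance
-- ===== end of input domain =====

-- B replaces A's two-phase build (fixed-order quarters ++ separately sorted overtimes) by one
-- stable keyed sort over a single filtered key list (objective: simpler).


-- ===== PORT A =====
-- A's inner `_ot_sort_key`: 'OT' ↦ 1, digit suffix ↦ int(suffix), else 99.
-- (B's inline key computes its overtime component by the same three lines, so both ports cite it.)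
def pyOtSortKey (label : String) : Int :=
  if label == "OT" then 1
  else
    let suffix := PySem.Str.slice label (some 2) none
    if PySem.Str.strIsdigit suffix then (PySem.Int.ofStr? suffix).getD 0 else 99

def ordered_period_keys_py (scores_dict : List (String × Int)) : List String :=
  let d := PySem.Dict.ofList scores_dict
  let base_order := (["1st", "2nd", "3rd", "4th"]).filter (fun label => d.contains label)
  let ot_keys := d.keys.filter (fun key => PySem.Str.startswith key "OT")
  let ot_ordered := PySem.List.sorted ot_keys pyOtSortKey false
  base_order ++ ot_ordered

-- ===== PORT B =====
def pvQuarterRank : PySem.Dict String Int :=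
  PySem.Dict.ofList [("1st", 0), ("2nd", 1), ("3rd", 2), ("4th", 3)]

-- first component of B's tuple key
def pvKey1 (label : String) : Int :=
  if pvQuarterRank.contains label then 0 else 1

-- second component of B's tuple key
def pvKey2 (label : String) : Int :=
  if pvQuarterRank.contains label then pvQuarterRank.getD label 0 else pyOtSortKey label

def ordered_period_keys_py_alt (scores_dict : List (String × Int)) : List String :=
  let d := PySem.Dict.ofList scores_dict
  let wanted := d.keys.filter (fun key => pvQuarterRank.contains key || PySem.Str.startswith key "OT")
  PySem.List.sorted2 wanted pvKey1 pvKey2 false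

-- ===== PRECONDITION & SPEC =====
def Spec_ordered_period_keys_py (scores_dict : List (String × Int)) (out : List String) : Prop := out = ordered_period_keys_py_alt scores_dict
instance (scores_dict : List (String × Int)) (out : List String) : Decidable (Spec_ordered_period_keys_py scores_dict out) := by unfold Spec_ordered_period_keys_py; infer_instance

-- ===== CLAIM (what is proved, stated in full; the proofs are below) =====
def Claim_equal_ordered_period_keys_py : Prop := ∀ (scores_dict : List (String × Int)), Dom_ordered_period_keys_py scores_dict → Spec_ordered_period_keys_py scores_dict (ordered_period_keys_py scores_dict)

-- ===== LEMMAS AND PROOFS =====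

-- membership of the insertion-sort fold
theorem pv_mem_foldl_insertBy {α : Type} (b : α → α → Bool) :
    ∀ (xs acc : List α) (y : α),
      y ∈ xs.foldl (fun a x => PySem.List.insertBy b x a) acc ↔ y ∈ acc ∨ y ∈ xs := by
  intro xs
  induction xs with
  | nil => simp
  | cons x t ih =>
      intro acc y
      simp [List.foldl_cons, ih, PySem.List.mem_insertBy]
      tauto

theorem pv_insertBy_congr {α : Type} (p q : α → α → Bool) (x : α) :
    ∀ (L : List α), (∀ y ∈ L, p x y = q x y) →
      PySem.List.insertBy p x L = PySem.List.insertBy q x L := by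
  intro L
  induction L with
  | nil => intro _; rfl
  | cons a t ih =>
      intro h
      have ha := h a (by simp)
      simp only [PySem.List.insertBy, ha]
      by_cases hq : q x a = true
      · simp [hq]
      · simp [hq, ih (fun y hy => h y (by simp [hy]))]

theorem pv_insertBy_append_right {α : Type} (p : α → α → Bool) (x : α) :
    ∀ (A B : List α), (∀ b ∈ B, p x b = true) →
      PySem.List.insertBy p x (A ++ B) = PySem.List.insertBy p x A ++ B := by
  intro A
  induction A with
  | nil =>
      intro B h
      cases B with
      | nil => rfl
      | cons b t => simp [PySem.List.insertBy, h b (by simp)]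
  | cons a t ih =>
      intro B h
      simp only [List.cons_append, PySem.List.insertBy]
      by_cases hp : p x a = true
      · simp [hp]
      · simp [hp, ih B h]

theorem pv_insertBy_append_left {α : Type} (p : α → α → Bool) (x : α) :
    ∀ (A B : List α), (∀ a ∈ A, p x a = false) →
      PySem.List.insertBy p x (A ++ B) = A ++ PySem.List.insertBy p x B := by
  intro A
  induction A with
  | nil => intro B _; rfl
  | cons a t ih =>
      intro B h
      simp only [List.cons_append, PySem.List.insertBy, h a (by simp)]
      simp [ih B (fun y hy => h y (by simp [hy]))]

-- a stable insertion sort whose comparator puts class-p elements strictly before the rest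
-- splits into the two sorted classes, concatenated
theorem pv_foldl_insertBy_split {α : Type} (p : α → Bool) (before bq bo : α → α → Bool)
    (hqq : ∀ x y, p x = true → p y = true → before x y = bq x y)
    (hoo : ∀ x y, p x = false → p y = false → before x y = bo x y)
    (hqo : ∀ x y, p x = true → p y = false → before x y = true)
    (hoq : ∀ x y, p x = false → p y = true → before x y = false) :
    ∀ (xs : List α),
      xs.foldl (fun acc x => PySem.List.insertBy before x acc) []
        = (xs.filter p).foldl (fun acc x => PySem.List.insertBy bq x acc) []
          ++ (xs.filter (fun x => !p x)).foldl (fun acc x => PySem.List.insertBy bo x acc) [] := by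
  intro xs
  induction xs using List.reverseRecOn with
  | nil => rfl
  | append_singleton t x ih =>
      have hQmem : ∀ y ∈ (t.filter p).foldl (fun acc x => PySem.List.insertBy bq x acc) [], p y = true := by
        intro y hy
        rcases (pv_mem_foldl_insertBy bq (t.filter p) [] y).1 hy with h | h
        · simp at h
        · exact (List.mem_filter.1 h).2
      have hOmem : ∀ y ∈ (t.filter (fun x => !p x)).foldl (fun acc x => PySem.List.insertBy bo x acc) [], p y = false := by
        intro y hy
        rcases (pv_mem_foldl_insertBy bo (t.filter (fun x => !p x)) [] y).1 hy with h | h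
        · simp at h
        · have := (List.mem_filter.1 h).2; simpa using this
      rw [List.foldl_append, List.foldl_cons, List.foldl_nil, ih]
      by_cases hx : p x = true
      · rw [pv_insertBy_append_right before x _ _ (fun b hb => hqo x b hx (hOmem b hb))]
        rw [pv_insertBy_congr before bq x _ (fun y hy => hqq x y hx (hQmem y hy))]
        simp [List.filter_append, hx]
      · have hx' : p x = false := by simpa using hx
        rw [pv_insertBy_append_left before x _ _ (fun a ha => hoq x a hx' (hQmem a ha))]
        rw [pv_insertBy_congr before bo x _ (fun y hy => hoo x y hx' (hOmem y hy))]
        simp [List.filter_append, hx']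

-- a quarter label never starts with "OT"
theorem pv_quarter_not_ot (x : String) (h : pvQuarterRank.contains x = true) :
    PySem.Str.startswith x "OT" = false := by
  have hk : x ∈ pvQuarterRank.keys := (PySem.Dict.contains_iff_mem_keys _ _).1 h
  have hkeys : pvQuarterRank.keys = ["1st", "2nd", "3rd", "4th"] := by decide
  rw [hkeys] at hk
  fin_cases hk <;> decide


-- quarter membership in the literal rank dict
theorem pv_contains_quarter (x : String) :
    pvQuarterRank.contains x = true ↔ x ∈ (["1st", "2nd", "3rd", "4th"] : List String) := by
  have hkeys : pvQuarterRank.keys = ["1st", "2nd", "3rd", "4th"] := by decide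
  rw [PySem.Dict.contains_iff_mem_keys, hkeys]

-- the single lexicographic sort of B splits into A's two sorted classes
theorem pv_sorted2_split (ks : List String) :
    PySem.List.sorted2 (ks.filter (fun k => pvQuarterRank.contains k || PySem.Str.startswith k "OT")) pvKey1 pvKey2 false
      = PySem.List.sorted (ks.filter (fun k => pvQuarterRank.contains k)) pvKey2 false
        ++ PySem.List.sorted (ks.filter (fun k => PySem.Str.startswith k "OT")) pyOtSortKey false := by
  have hsplit := pv_foldl_insertBy_split (fun k => pvQuarterRank.contains k)
      (fun a b => decide (pvKey1 a < pvKey1 b) || (!decide (pvKey1 b < pvKey1 a) && decide (pvKey2 a < pvKey2 b)))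
      (fun a b => decide (pvKey2 a < pvKey2 b))
      (fun a b => decide (pyOtSortKey a < pyOtSortKey b))
      (by intro x y hx hy; simp [pvKey1, hx, hy])
      (by intro x y hx hy; simp [pvKey1, pvKey2, hx, hy])
      (by intro x y hx hy; simp [pvKey1, hx, hy])
      (by intro x y hx hy; simp [pvKey1, hx, hy])
      (ks.filter (fun k => pvQuarterRank.contains k || PySem.Str.startswith k "OT"))
  have hfq : (ks.filter (fun k => pvQuarterRank.contains k || PySem.Str.startswith k "OT")).filter
        (fun k => pvQuarterRank.contains k) = ks.filter (fun k => pvQuarterRank.contains k) := by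
    rw [List.filter_filter]
    apply List.filter_congr
    intro a _
    by_cases h : pvQuarterRank.contains a = true <;> simp [h]
  have hfo : (ks.filter (fun k => pvQuarterRank.contains k || PySem.Str.startswith k "OT")).filter
        (fun k => !pvQuarterRank.contains k) = ks.filter (fun k => PySem.Str.startswith k "OT") := by
    rw [List.filter_filter]
    apply List.filter_congr
    intro a _
    by_cases h : pvQuarterRank.contains a = true
    · have hsw := pv_quarter_not_ot a h
      simp only [h, hsw]
      decide
    · simp [h]
  rw [hfq, hfo] at hsplit
  exact hsplit

-- the quarters, sorted by their rank, are exactly A's ordered selection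
theorem pv_quarters_sorted (d : PySem.Dict String Int) (hnd : d.keys.Nodup) :
    PySem.List.sorted (d.keys.filter (fun k => pvQuarterRank.contains k)) pvKey2 false
      = (["1st", "2nd", "3rd", "4th"]).filter (fun label => d.contains label) := by
  apply PySem.List.sorted_eq_of_perm_of_pairwise_lt
  · -- permutation
    apply List.perm_of_nodup_nodup_toFinset_eq
    · exact List.Nodup.sublist List.filter_sublist (by decide)
    · exact hnd.filter _
    · ext x
      simp only [List.mem_toFinset, List.mem_filter]
      constructor
      · rintro ⟨hx4, hc⟩
        exact ⟨(PySem.Dict.contains_iff_mem_keys _ _).1 hc, (pv_contains_quarter x).2 hx4⟩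
      · rintro ⟨hk, hq⟩
        exact ⟨(pv_contains_quarter x).1 hq, (PySem.Dict.contains_iff_mem_keys _ _).2 hk⟩
  · -- strictly increasing ranks
    exact List.Pairwise.sublist List.filter_sublist (by decide)

-- ===== VERDICT (by name: the statement is the Claim_ definition above) =====
theorem ordered_period_keys_py_spec : Claim_equal_ordered_period_keys_py := by
  intro scores_dict _
  unfold Spec_ordered_period_keys_py ordered_period_keys_py ordered_period_keys_py_alt
  rw [pv_sorted2_split, pv_quarters_sorted _ (PySem.Dict.nodup_keys_ofList scores_dict)]
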